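-- pv_equiv track=rewrite | github.com/DerivedFunction01/sec-nlp | defs/table_processor.py | _is_numeric_start
-- ===== SOURCE A (Python) =====
-- PREFIX_SYMBOLS = set()
--
-- SUFFIX_SYMBOLS = set()
--
-- def _is_numeric_start(val: str) -> bool:
--     """Check if value looks like start of a number"""
--     if not val:
--         return False
--     clean = val
--     for symbol in PREFIX_SYMBOLS:
--         clean = clean.replace(symbol, "")
--     for symbol in SUFFIX_SYMBOLS:
--         clean = clean.replace(symbol, "")
--     clean = clean.replace(",", "").replace("(", "").replace(" ", "")
--     if not clean:
--         return False
--     return clean[0].isdigit() or clean.startswith("-") or clean.startswith(".")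
-- ===== SOURCE B (Python) =====
-- def _is_numeric_start(val: str) -> bool:
--     """Check if value looks like start of a number"""
--     for c in val:
--         if c not in (',', '(', ' '):
--             return c.isdigit() or c == '-' or c == '.'
--     return False
-- ===== Notes on version B (the rewrite author's own statement) =====
-- stated objective: simpler
-- what changed: Replaces the build-then-index strategy (three full replace passes constructing a cleaned string, then inspecting its first character) with a single forward scan that stops at the first character outside {',', '(', ' '} and classifies it directly.
import Mathlib
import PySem

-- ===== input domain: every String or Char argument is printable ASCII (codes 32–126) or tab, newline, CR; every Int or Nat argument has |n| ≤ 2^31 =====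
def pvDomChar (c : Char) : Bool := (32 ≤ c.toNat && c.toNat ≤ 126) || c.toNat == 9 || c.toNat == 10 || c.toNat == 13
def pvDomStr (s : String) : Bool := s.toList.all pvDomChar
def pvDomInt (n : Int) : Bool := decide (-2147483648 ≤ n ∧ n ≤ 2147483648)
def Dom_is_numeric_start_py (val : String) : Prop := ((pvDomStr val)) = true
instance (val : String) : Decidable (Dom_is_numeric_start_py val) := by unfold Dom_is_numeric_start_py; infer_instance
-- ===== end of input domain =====

-- B replaces A's build-then-index cleaning (three replace passes, then first-character tests)
-- by a single forward scan for the first character outside {',', '(', ' '}; objective: simpler.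


-- ===== PORT A =====
-- PREFIX_SYMBOLS and SUFFIX_SYMBOLS are empty sets in the source module, so the two
-- 'for symbol in …' loops perform no iterations; they are ported as the identity.
def is_numeric_start_py (val : String) : Bool :=
  if val.toList.isEmpty then false
  else
    let clean := val
    let clean := PySem.Str.replace (PySem.Str.replace (PySem.Str.replace clean "," "") "(" "") " " ""
    if clean.toList.isEmpty then false
    else
      ((PySem.Str.pyGet? clean 0).elim false PySem.Chars.isdigit)
        || PySem.Str.startswith clean "-" || PySem.Str.startswith clean "."

-- ===== PORT B =====
-- the 'for c in val: if c not in (',', '(', ' '): return …' loop of Source B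
def isNumericStartScan : List Char → Bool
  | [] => false
  | c :: t =>
    if !(c == ',' || c == '(' || c == ' ') then
      PySem.Chars.isdigit c || c == '-' || c == '.'
    else isNumericStartScan t

def is_numeric_start_py_alt (val : String) : Bool := isNumericStartScan val.toList

-- ===== PRECONDITION & SPEC =====
def Spec_is_numeric_start_py (val : String) (out : Bool) : Prop := out = is_numeric_start_py_alt val
instance (val : String) (out : Bool) : Decidable (Spec_is_numeric_start_py val out) := by unfold Spec_is_numeric_start_py; infer_instance

-- ===== CLAIM (what is proved, stated in full; the proofs are below) =====
def Claim_equal_is_numeric_start_py : Prop := ∀ (val : String), Dom_is_numeric_start_py val → Spec_is_numeric_start_py val (is_numeric_start_py val)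

-- ===== LEMMAS AND PROOFS =====

-- replace.go with a single-character pattern and empty replacement is a filter
theorem replace_go_single (c : Char) (fuel : Nat) (l acc : List Char) (h : l.length ≤ fuel) :
    PySem.Chars.replace.go [c] [] fuel l acc = acc.reverse ++ l.filter (· != c) := by
  induction fuel generalizing l acc with
  | zero =>
    have : l = [] := List.length_eq_zero_iff.mp (Nat.le_zero.mp h)
    subst this
    simp [PySem.Chars.replace.go]
  | succ n ih =>
    cases l with
    | nil => simp [PySem.Chars.replace.go]
    | cons x t =>
      simp only [PySem.Chars.replace.go]
      by_cases hx : x = c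
      · subst hx
        have hp : List.isPrefixOf [x] (x :: t) = true := by simp [List.isPrefixOf]
        rw [if_pos hp]
        simp only [List.length_cons] at h
        simp [ih t acc (by omega)]
      · have hp : List.isPrefixOf [c] (x :: t) = false := by
          simp [List.isPrefixOf]
          intro hxc; exact hx hxc.symm
        rw [if_neg (by simp [hp])]
        simp only [List.length_cons] at h
        rw [ih t (x :: acc) (by omega)]
        simp [hx]

theorem replace_single (cs : List Char) (c : Char) :
    PySem.Chars.replace cs [c] [] = cs.filter (· != c) := by
  simp only [PySem.Chars.replace, List.isEmpty_cons, if_neg Bool.false_ne_true]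
  simpa using replace_go_single c cs.length cs [] le_rfl

-- the scan of B equals the head-inspection of the combined filter
theorem scan_eq_filter (cs : List Char) :
    isNumericStartScan cs =
      match cs.filter (fun c => !(c == ',' || c == '(' || c == ' ')) with
      | [] => false
      | c :: _ => PySem.Chars.isdigit c || c == '-' || c == '.' := by
  induction cs with
  | nil => rfl
  | cons x t ih =>
    simp only [isNumericStartScan, List.filter_cons]
    by_cases hx : (!(x == ',' || x == '(' || x == ' ')) = true
    · simp [hx]
    · rw [if_neg hx]
      rw [Bool.not_eq_true] at hx
      simp [hx, ih]

-- ===== VERDICT (by name: the statement is the Claim_ definition above) =====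
theorem is_numeric_start_py_spec : Claim_equal_is_numeric_start_py := by
  intro val _
  unfold Spec_is_numeric_start_py is_numeric_start_py is_numeric_start_py_alt
  rw [scan_eq_filter]
  by_cases hemp : val.toList.isEmpty
  · rw [if_pos hemp]
    rw [List.isEmpty_iff] at hemp
    simp [hemp]
  · rw [if_neg hemp]
    have hclean : (PySem.Str.replace (PySem.Str.replace (PySem.Str.replace val "," "") "(" "") " " "").toList
        = val.toList.filter (fun c => !(c == ',' || c == '(' || c == ' ')) := by
      simp only [PySem.Str.toList_replace]
      have h1 : ("," : String).toList = [','] := rfl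
      have h2 : ("(" : String).toList = ['('] := rfl
      have h3 : (" " : String).toList = [' '] := rfl
      have h4 : ("" : String).toList = [] := rfl
      rw [h1, h2, h3, h4, replace_single, replace_single, replace_single,
        List.filter_filter, List.filter_filter]
      apply List.filter_congr
      intro c _
      cases h1 : (c == ',') <;> cases h2 : (c == '(') <;> cases h3 : (c == ' ') <;>
        simp_all [bne]
    cases hf : val.toList.filter (fun c => !(c == ',' || c == '(' || c == ' ')) with
    | nil =>
      rw [hf] at hclean
      rw [if_pos (List.isEmpty_iff.mpr hclean)]
    | cons c rest =>
      rw [hf] at hclean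
      rw [if_neg (by simp [hclean])]
      have hget : PySem.Str.pyGet? (PySem.Str.replace (PySem.Str.replace (PySem.Str.replace val "," "") "(" "") " " "") 0 = some c := by
        simp [PySem.Str.pyGet?, hclean, PySem.Chars.pyGet?, PySem.List.pyGet?, PySem.List.pyIdx?]
      have hdash : PySem.Str.startswith (PySem.Str.replace (PySem.Str.replace (PySem.Str.replace val "," "") "(" "") " " "") "-" = (c == '-') := by
        simp [PySem.Str.startswith, hclean, PySem.Chars.startswith, List.isPrefixOf]
        exact eq_comm
      have hdot : PySem.Str.startswith (PySem.Str.replace (PySem.Str.replace (PySem.Str.replace val "," "") "(" "") " " "") "." = (c == '.') := by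
        simp [PySem.Str.startswith, hclean, PySem.Chars.startswith, List.isPrefixOf]
        exact eq_comm
      rw [hget, hdash, hdot]
      rfl
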